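-- pv_equiv track=rewrite | github.com/dfg-98/DAA | penga_binary_search.py | penga_binary
-- ===== SOURCE A (Python) =====
-- def penga_binary(h, C, E, M):
--     """
--     O(n log(|h_max-h_min|))
--     """
--     low = min(h)
--     top = max(h)
--
--
--     while top - low > 1:
--         mid = (top + low) // 2
--         mid_cost = penga_goal(h, C, E, M, mid)
--         next_cost = penga_goal(h, C, E, M, mid + 1)
--         if mid_cost > next_cost:
--             low = mid
--         else:
--             top = mid
--
--     if top - low == 1:
--         top_cost = penga_goal(h, C, E, M, top)
--         low_cost = penga_goal(h, C, E, M, low)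
--         return min(top_cost, low_cost)
--
--     return penga_goal(h, C, E, M, top)
--
-- def penga_goal(h, C, E, M, goal):
--     """
--     O(n)
--     """
--     n = len(h)
--     moves = [0, 0]
--
--     for i in range(n):
--         if h[i - 1] < goal:
--             c = goal - h[i - 1]
--             moves[0] += c
--         else:
--             e = h[i - 1] - goal
--             moves[1] += e
--
--     min_cost = moves[0] * C + moves[1] * E
--     if moves[0] < moves[1]:
--         c = (moves[1] - moves[0]) * E + moves[0] * M
--         min_cost = min(min_cost, c)
--         c = moves[1] * M + (moves[1] - moves[0]) * C
--         min_cost = min(min_cost, c)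
--     else:
--         e = (moves[0] - moves[1]) * C + moves[1] * M
--         min_cost = min(min_cost, e)
--         e = moves[0] * M + (moves[0] - moves[1]) * E
--         min_cost = min(min_cost, e)
--
--     return min_cost
-- ===== SOURCE B (Python) =====
-- def penga_binary(h, C, E, M):
--     # Sort once + prefix sums; each candidate goal's below/above totals are then
--     # answered with one binary search over the sorted heights instead of an O(n) scan.
--     s = sorted(h)
--     n = len(s)
--     prefix = [0]
--     run = 0
--     for x in s:
--         run += x
--         prefix.append(run)
--     total = run
--
--     def bisect_left(goal):
--         lo, hi = 0, n
--         while lo < hi: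
--             mid = (lo + hi) // 2
--             if s[mid] < goal:
--                 lo = mid + 1
--             else:
--                 hi = mid
--         return lo
--
--     def cost(goal):
--         k = bisect_left(goal)
--         pk = prefix[k]
--         below = goal * k - pk
--         above = (total - pk) - goal * (n - k)
--         best = below * C + above * E
--         if below < above:
--             best = min(best, (above - below) * E + below * M)
--             best = min(best, above * M + (above - below) * C)
--         else:
--             best = min(best, (below - above) * C + above * M)
--             best = min(best, below * M + (below - above) * E)
--         return best
--
--     low, top = s[0], s[n - 1]
--     while top - low > 1:
--         mid = (top + low) // 2
--         if cost(mid) > cost(mid + 1):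
--             low = mid
--         else:
--             top = mid
--     if top - low == 1:
--         return min(cost(top), cost(low))
--     return cost(top)
-- ===== Notes on version B (the rewrite author's own statement) =====
-- stated objective: faster
-- what changed: B sorts the heights once and builds prefix sums, then answers each probed goal's below/above totals with one binary search over the sorted list instead of A's O(n) scan per probe; the empty list, on which A raises ValueError (min of empty sequence), is excluded by Pre_.
import Mathlib
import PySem

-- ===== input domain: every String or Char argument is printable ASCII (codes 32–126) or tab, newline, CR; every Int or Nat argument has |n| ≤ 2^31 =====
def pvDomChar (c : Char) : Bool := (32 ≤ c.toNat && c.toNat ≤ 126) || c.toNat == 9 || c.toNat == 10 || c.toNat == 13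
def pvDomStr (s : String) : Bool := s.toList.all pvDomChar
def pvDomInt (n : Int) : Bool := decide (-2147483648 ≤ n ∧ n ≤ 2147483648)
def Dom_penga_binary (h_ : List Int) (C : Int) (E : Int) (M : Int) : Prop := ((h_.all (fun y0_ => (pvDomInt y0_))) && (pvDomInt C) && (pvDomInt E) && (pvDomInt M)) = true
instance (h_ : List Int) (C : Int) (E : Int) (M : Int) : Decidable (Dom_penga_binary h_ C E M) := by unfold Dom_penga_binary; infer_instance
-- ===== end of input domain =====

-- B replaces A's O(n) cost scan per probed goal by a sort + prefix sums done once and a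
-- binary search per probed goal: O(n log range) becomes O(n log n + log range · log n).

-- ===== PORT A =====
-- penga_goal: one O(n) scan; h[i-1] for i in range(n) is in range whenever it is reached,
-- so pyGetD is exact here.
def pengaGoal (h : List Int) (C : Int) (E : Int) (M : Int) (goal : Int) : Int :=
  let n : Int := PySem.List.len h
  let moves : Int × Int :=
    (PySem.List.pyRange 0 n 1).foldl
      (fun (mv : Int × Int) i =>
        let hi := PySem.List.pyGetD h (i - 1) 0
        if hi < goal then (mv.1 + (goal - hi), mv.2)
        else (mv.1, mv.2 + (hi - goal)))
      (0, 0)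
  let min_cost := moves.1 * C + moves.2 * E
  if moves.1 < moves.2 then
    min (min min_cost ((moves.2 - moves.1) * E + moves.1 * M))
        (moves.2 * M + (moves.2 - moves.1) * C)
  else
    min (min min_cost ((moves.1 - moves.2) * C + moves.2 * M))
        (moves.1 * M + (moves.1 - moves.2) * E)

-- A's while loop: returns the final (low, top).
def pengaLoopA (h : List Int) (C : Int) (E : Int) (M : Int) (low top : Int) : Int × Int :=
  if htl : 1 < top - low then
    let mid := PySem.Int.floordiv (top + low) 2
    if pengaGoal h C E M mid > pengaGoal h C E M (mid + 1) then
      pengaLoopA h C E M mid top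
    else
      pengaLoopA h C E M low mid
  else (low, top)
termination_by (top - low).toNat
decreasing_by
  all_goals
    have h2 : PySem.Int.floordiv (top + low) 2 = (top + low) / 2 :=
      PySem.Int.floordiv_eq_ediv_of_pos (by omega)
    simp only [h2]; omega

def penga_binary (h_ : List Int) (C : Int) (E : Int) (M : Int) : Int :=
  -- min(h), max(h): ValueError on the empty list → excluded by Pre_ (default 0 unreachable there)
  match PySem.List.min? h_ (fun x => x), PySem.List.max? h_ (fun x => x) with
  | some low0, some top0 =>
    let lt := pengaLoopA h_ C E M low0 top0
    if lt.2 - lt.1 = 1 then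
      min (pengaGoal h_ C E M lt.2) (pengaGoal h_ C E M lt.1)
    else pengaGoal h_ C E M lt.2
  | _, _ => 0

-- ===== PORT B =====
-- Source B's hand-written bisect_left loop (lo, hi stay in [0, len s], so getD is exact).
def pvBisect (s : List Int) (goal : Int) (lo hi : Nat) : Nat :=
  if hlt : lo < hi then
    let mid := (lo + hi) / 2
    if s.getD mid 0 < goal then pvBisect s goal (mid + 1) hi
    else pvBisect s goal lo mid
  else lo
termination_by hi - lo
decreasing_by all_goals omega

-- Source B's prefix-sum loop: state = (prefix list built so far, running sum)
def pvPrefix (s : List Int) : List Int × Int :=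
  s.foldl (fun (p : List Int × Int) x => (p.1 ++ [p.2 + x], p.2 + x)) ([0], 0)

-- Source B's cost(goal)
def pvCost (s prefixL : List Int) (n : Nat) (total C E M goal : Int) : Int :=
  let k := pvBisect s goal 0 n
  let pk := prefixL.getD k 0
  let below := goal * (k : Int) - pk
  let above := (total - pk) - goal * ((n : Int) - (k : Int))
  let best := below * C + above * E
  if below < above then
    min (min best ((above - below) * E + below * M)) (above * M + (above - below) * C)
  else
    min (min best ((below - above) * C + above * M)) (below * M + (below - above) * E)

-- Source B's while loop (same search, cost via pvCost): returns the final (low, top).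
def pengaLoopB (s prefixL : List Int) (n : Nat) (total C E M : Int) (low top : Int) : Int × Int :=
  if htl : 1 < top - low then
    let mid := PySem.Int.floordiv (top + low) 2
    if pvCost s prefixL n total C E M mid > pvCost s prefixL n total C E M (mid + 1) then
      pengaLoopB s prefixL n total C E M mid top
    else
      pengaLoopB s prefixL n total C E M low mid
  else (low, top)
termination_by (top - low).toNat
decreasing_by
  all_goals
    have h2 : PySem.Int.floordiv (top + low) 2 = (top + low) / 2 :=
      PySem.Int.floordiv_eq_ediv_of_pos (by omega)
    simp only [h2]; omega

def penga_binary_alt (h_ : List Int) (C : Int) (E : Int) (M : Int) : Int :=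
  let s := PySem.List.sorted h_ (fun x => x) false
  let n := s.length
  let pr := pvPrefix s
  -- s[0], s[n-1]: IndexError on the empty list → excluded by Pre_ (default 0 unreachable there)
  let low0 := s.getD 0 0
  let top0 := s.getD (n - 1) 0
  let lt := pengaLoopB s pr.1 n pr.2 C E M low0 top0
  if lt.2 - lt.1 = 1 then
    min (pvCost s pr.1 n pr.2 C E M lt.2) (pvCost s pr.1 n pr.2 C E M lt.1)
  else pvCost s pr.1 n pr.2 C E M lt.2

-- ===== PRECONDITION & SPEC =====
-- A raises ValueError (min of an empty sequence) on h_ = []; excluded.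
def Pre_penga_binary (h_ : List Int) (C : Int) (E : Int) (M : Int) : Prop := h_ ≠ []
instance (h_ : List Int) (C : Int) (E : Int) (M : Int) : Decidable (Pre_penga_binary h_ C E M) := by unfold Pre_penga_binary; infer_instance
def pvWitness_penga_binary : List Int × Int × Int × Int := ([3, 1, 4], 2, 5, 1)

def Spec_penga_binary (h_ : List Int) (C : Int) (E : Int) (M : Int) (out : Int) : Prop := out = penga_binary_alt h_ C E M
instance (h_ : List Int) (C : Int) (E : Int) (M : Int) (out : Int) : Decidable (Spec_penga_binary h_ C E M out) := by unfold Spec_penga_binary; infer_instance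

-- ===== CLAIM (what is proved, stated in full; the proofs are below) =====
def Claim_equal_penga_binary : Prop := ∀ (h_ : List Int) (C : Int) (E : Int) (M : Int), Dom_penga_binary h_ C E M → Pre_penga_binary h_ C E M → Spec_penga_binary h_ C E M (penga_binary h_ C E M)

-- ===== LEMMAS AND PROOFS =====


lemma range_map_getD (h : List Int) : ∀ m, m ≤ h.length →
    (List.range m).map (fun k => h.getD k 0) = h.take m := by
  intro m hm
  apply List.ext_getElem
  · simp [hm]
  · intro i h1 h2
    simp at h1 h2 ⊢
    rw [List.getElem?_eq_getElem (by omega : i < h.length)]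
    simp

lemma accessed (h : List Int) (hne : h ≠ []) :
    (PySem.List.pyRange 0 (PySem.List.len h) 1).map (fun i => PySem.List.pyGetD h (i - 1) 0)
      = h.getLast hne :: h.dropLast := by
  have hn : (0:Int) < PySem.List.len h := by
    simp [PySem.List.len]
    exact List.length_pos_iff.mpr hne
  rw [PySem.List.pyRange_one_cons hn]
  simp only [List.map_cons]
  congr 1
  · simpa using PySem.List.pyGetD_neg_one h 0 hne
  · rw [PySem.List.pyRange_one]
    rw [List.map_map]
    simp only [zero_add]
    have hlen : ((PySem.List.len h) - 1).toNat = h.length - 1 := by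
      simp [PySem.List.len]
    rw [hlen]
    calc (List.range (h.length - 1)).map ((fun i => PySem.List.pyGetD h (i - 1) 0) ∘ (fun k : Nat => (1:Int) + k))
        = (List.range (h.length - 1)).map (fun k => h.getD k 0) := by
          apply List.map_congr_left; intro k _
          simp
      _ = h.take (h.length - 1) := range_map_getD h _ (by omega)
      _ = h.dropLast := by rw [List.dropLast_eq_take]

lemma sum_getLast_dropLast (h : List Int) (hne : h ≠ []) (F : Int → Int) :
    ((h.getLast hne :: h.dropLast).map F).sum = (h.map F).sum := by
  conv_rhs => rw [← List.dropLast_append_getLast hne]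
  simp [add_comm]

lemma pengaGoal_moves (h : List Int) (g : Int) (hne : h ≠ []) :
    (PySem.List.pyRange 0 (PySem.List.len h) 1).foldl
      (fun (mv : Int × Int) i =>
        let hi := PySem.List.pyGetD h (i - 1) 0
        if hi < g then (mv.1 + (g - hi), mv.2)
        else (mv.1, mv.2 + (hi - g)))
      (0, 0)
      = ((h.map (fun x => if x < g then g - x else 0)).sum,
         (h.map (fun x => if x < g then 0 else x - g)).sum) := by
  have hbody : (fun (mv : Int × Int) i =>
        let hi := PySem.List.pyGetD h (i - 1) 0
        if hi < g then (mv.1 + (g - hi), mv.2)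
        else (mv.1, mv.2 + (hi - g)))
      = fun (mv : Int × Int) i =>
        (mv.1 + (if PySem.List.pyGetD h (i - 1) 0 < g then g - PySem.List.pyGetD h (i - 1) 0 else 0),
         mv.2 + (if PySem.List.pyGetD h (i - 1) 0 < g then 0 else PySem.List.pyGetD h (i - 1) 0 - g)) := by
    funext mv i
    by_cases hx : PySem.List.pyGetD h (i - 1) 0 < g <;> simp [hx]
  rw [hbody]
  have hsplit := PySem.List.foldl_prod_mk
    (fun a i => a + (if PySem.List.pyGetD h (i - 1) 0 < g then g - PySem.List.pyGetD h (i - 1) 0 else 0))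
    (fun a i => a + (if PySem.List.pyGetD h (i - 1) 0 < g then 0 else PySem.List.pyGetD h (i - 1) 0 - g))
    (PySem.List.pyRange 0 (PySem.List.len h) 1) 0 0
  rw [hsplit]
  rw [PySem.List.foldl_add, PySem.List.foldl_add]
  have hmapped : ∀ (F : Int → Int),
      ((PySem.List.pyRange 0 (PySem.List.len h) 1).map
        (fun i => F (PySem.List.pyGetD h (i - 1) 0))).sum = (h.map F).sum := by
    intro F
    have : (fun i => F (PySem.List.pyGetD h (i - 1) 0))
        = F ∘ (fun i => PySem.List.pyGetD h (i - 1) 0) := rfl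
    rw [this, ← List.map_map, accessed h hne, sum_getLast_dropLast h hne]
  rw [show ((PySem.List.pyRange 0 (PySem.List.len h) 1).map
        (fun i => if PySem.List.pyGetD h (i - 1) 0 < g then g - PySem.List.pyGetD h (i - 1) 0 else 0)).sum
      = (h.map (fun x => if x < g then g - x else 0)).sum from hmapped (fun x => if x < g then g - x else 0)]
  rw [show ((PySem.List.pyRange 0 (PySem.List.len h) 1).map
        (fun i => if PySem.List.pyGetD h (i - 1) 0 < g then 0 else PySem.List.pyGetD h (i - 1) 0 - g)).sum
      = (h.map (fun x => if x < g then 0 else x - g)).sum from hmapped (fun x => if x < g then 0 else x - g)]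
  simp

lemma sum_clip_lt (g : Int) : ∀ (t : List Int), (∀ x ∈ t, x < g) →
    ((t.map (fun x => if x < g then g - x else 0)).sum = g * t.length - t.sum ∧
     (t.map (fun x => if x < g then 0 else x - g)).sum = 0) := by
  intro t
  induction t with
  | nil => simp
  | cons x t ih =>
    intro hall
    have hx : x < g := hall x (by simp)
    have ht := ih (fun y hy => hall y (by simp [hy]))
    simp [hx, ht.1, ht.2]
    ring

lemma sum_clip_ge (g : Int) : ∀ (t : List Int), (∀ x ∈ t, g ≤ x) →
    ((t.map (fun x => if x < g then g - x else 0)).sum = 0 ∧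
     (t.map (fun x => if x < g then 0 else x - g)).sum = t.sum - g * t.length) := by
  intro t
  induction t with
  | nil => simp
  | cons x t ih =>
    intro hall
    have hx : ¬ x < g := not_lt.mpr (hall x (by simp))
    have ht := ih (fun y hy => hall y (by simp [hy]))
    simp [hx, ht.1, ht.2]
    ring

lemma pvBisect_spec (s : List Int) (g : Int) (hs : s.Pairwise (· ≤ ·)) :
    ∀ lo hi : Nat, lo ≤ hi → hi ≤ s.length →
      (∀ j (hj : j < s.length), j < lo → s[j] < g) →
      (∀ j (hj : j < s.length), hi ≤ j → g ≤ s[j]) →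
      lo ≤ pvBisect s g lo hi ∧ pvBisect s g lo hi ≤ hi ∧
      (∀ j (hj : j < s.length), j < pvBisect s g lo hi → s[j] < g) ∧
      (∀ j (hj : j < s.length), pvBisect s g lo hi ≤ j → g ≤ s[j]) := by
  intro lo hi
  induction lo, hi using pvBisect.induct s g with
  | case1 lo hi hlt mid hmidlt ih =>
    intro _ hhi hlow hhigh
    have e : mid = (lo + hi) / 2 := rfl
    have hm' : s.getD ((lo + hi) / 2) 0 < g := hmidlt
    rw [pvBisect]
    simp only [dif_pos hlt, if_pos hm']
    rw [← e]
    have hmid : (lo + hi) / 2 < s.length := by omega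
    rw [← e] at hmid
    have hrec := ih (by omega) hhi
      (fun j hj hjlt => by
        rcases Nat.lt_or_ge j mid with hc | hc
        · have h1 : s[j] ≤ s[mid] := List.pairwise_iff_getElem.mp hs j mid hj hmid hc
          have h2 : s[mid] < g := by rwa [List.getD_eq_getElem s 0 hmid] at hmidlt
          omega
        · have : j = mid := by omega
          subst this
          rwa [List.getD_eq_getElem s 0 hmid] at hmidlt)
      hhigh
    exact ⟨by omega, by omega, hrec.2.2.1, hrec.2.2.2⟩
  | case2 lo hi hlt mid hmidge ih =>
    intro hle hhi hlow hhigh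
    have e : mid = (lo + hi) / 2 := rfl
    have hm' : ¬ s.getD ((lo + hi) / 2) 0 < g := hmidge
    rw [pvBisect]
    simp only [dif_pos hlt, if_neg hm']
    rw [← e]
    have hmid : (lo + hi) / 2 < s.length := by omega
    rw [← e] at hmid
    have hrec := ih (by omega) (by omega) hlow
      (fun j hj hjge => by
        have h2 : g ≤ s[mid] := by
          have hx := not_lt.mp hmidge
          rwa [List.getD_eq_getElem s 0 hmid] at hx
        rcases Nat.lt_or_ge mid j with hc | hc
        · have h1 : s[mid] ≤ s[j] := List.pairwise_iff_getElem.mp hs mid j hmid hj hc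
          omega
        · have : j = mid := by omega
          subst this; exact h2)
    exact ⟨by omega, by omega, hrec.2.2.1, hrec.2.2.2⟩
  | case3 lo hi hnlt =>
    intro hle _ hlow hhigh
    rw [pvBisect]
    simp only [dif_neg hnlt]
    exact ⟨le_refl _, hle, hlow, fun j hj hjge => hhigh j hj (by omega)⟩

lemma pvPrefix_gen (s : List Int) : ∀ (acc : List Int) (run : Int),
    s.foldl (fun (p : List Int × Int) x => (p.1 ++ [p.2 + x], p.2 + x)) (acc, run)
      = (acc ++ (List.range s.length).map (fun k => run + (s.take (k+1)).sum), run + s.sum) := by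
  induction s with
  | nil => simp
  | cons x t ih =>
    intro acc run
    simp only [List.foldl_cons]
    rw [ih]
    simp [List.range_succ_eq_map, List.map_map, Function.comp_def, add_assoc]

lemma pvPrefix_eq (s : List Int) :
    (pvPrefix s).1 = (List.range (s.length + 1)).map (fun k => (s.take k).sum) := by
  unfold pvPrefix
  rw [pvPrefix_gen]
  simp [List.range_succ_eq_map, List.map_map, Function.comp_def]

lemma pvPrefix_getD (s : List Int) (k : Nat) (hk : k ≤ s.length) :
    (pvPrefix s).1.getD k 0 = (s.take k).sum := by
  rw [pvPrefix_eq, PySem.List.getD_map_range _ _ _ _ (by omega)]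

lemma pvPrefix_total (s : List Int) : (pvPrefix s).2 = s.sum := by
  unfold pvPrefix; rw [pvPrefix_gen]; simp

-- clipped sums over the sorted list in closed form at the bisect split
lemma cost_eq (h : List Int) (C E M g : Int) (hne : h ≠ []) :
    pengaGoal h C E M g =
      pvCost (PySem.List.sorted h (fun x => x) false)
             (pvPrefix (PySem.List.sorted h (fun x => x) false)).1
             (PySem.List.sorted h (fun x => x) false).length
             (pvPrefix (PySem.List.sorted h (fun x => x) false)).2 C E M g := by
  have hsp : (PySem.List.sorted h (fun x => x) false).Pairwise (· ≤ ·) :=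
    PySem.List.sorted_pairwise h (fun x => x)
  have hperm : (PySem.List.sorted h (fun x => x) false).Perm h :=
    PySem.List.sorted_perm h (fun x => x) false
  set s := PySem.List.sorted h (fun x => x) false with hsdef
  set n := s.length with hndef
  set K := pvBisect s g 0 n with hKdef
  obtain ⟨-, hKn, hlt, hge⟩ := pvBisect_spec s g hsp 0 n (by omega) (le_refl _)
    (fun j hj hjl => absurd hjl (by omega))
    (fun j hj hgej => absurd hj (by omega))
  have htake : ∀ x ∈ s.take K, x < g := by
    intro x hx
    obtain ⟨i, hi, hxe⟩ := List.mem_iff_getElem.mp hx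
    rw [List.getElem_take] at hxe
    subst hxe
    exact hlt i (by simp at hi; omega) (by simp at hi; omega)
  have hdrop : ∀ x ∈ s.drop K, g ≤ x := by
    intro x hx
    obtain ⟨i, hi, hxe⟩ := List.mem_iff_getElem.mp hx
    rw [List.getElem_drop] at hxe
    subst hxe
    exact hge (K + i) (by simp at hi; omega) (by omega)
  have h1 := sum_clip_lt g (s.take K) htake
  have h2 := sum_clip_ge g (s.drop K) hdrop
  have hsplitsum : (s.take K).sum + (s.drop K).sum = s.sum := by
    rw [← List.sum_append, List.take_append_drop]
  have hlentake : ((s.take K).length : Int) = (K : Int) := by simp; omega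
  have hlendrop : ((s.drop K).length : Int) = (n : Int) - (K : Int) := by
    simp; omega
  have hsum1 : (h.map (fun x => if x < g then g - x else 0)).sum
      = g * (K : Int) - (s.take K).sum := by
    rw [← ((hperm.map _).sum_eq)]
    conv_lhs => rw [← List.take_append_drop K s]
    rw [List.map_append, List.sum_append, h1.1, h2.1, hlentake]
    ring
  have hsum2 : (h.map (fun x => if x < g then 0 else x - g)).sum
      = ((pvPrefix s).2 - (s.take K).sum) - g * ((n : Int) - (K : Int)) := by
    rw [← ((hperm.map _).sum_eq)]
    conv_lhs => rw [← List.take_append_drop K s]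
    rw [List.map_append, List.sum_append, h1.2, h2.2, hlendrop, pvPrefix_total]
    have := hsplitsum
    linarith
  have hpk : (pvPrefix s).1.getD K 0 = (s.take K).sum := pvPrefix_getD s K hKn
  unfold pengaGoal pvCost
  simp only [pengaGoal_moves h g hne, ← hKdef, hpk, hsum1, hsum2]

-- the two search loops coincide once the two cost functions do
lemma loop_eq (h s prefixL : List Int) (n : Nat) (total C E M : Int)
    (hc : ∀ g, pengaGoal h C E M g = pvCost s prefixL n total C E M g) :
    ∀ low top, pengaLoopA h C E M low top = pengaLoopB s prefixL n total C E M low top := by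
  intro low top
  induction low, top using pengaLoopA.induct h C E M with
  | case1 low top hlt mid hgt ih =>
    have hgt' : pvCost s prefixL n total C E M (PySem.Int.floordiv (top + low) 2) >
        pvCost s prefixL n total C E M (PySem.Int.floordiv (top + low) 2 + 1) := by
      rw [← hc, ← hc]; exact hgt
    have hgt2 : pengaGoal h C E M (PySem.Int.floordiv (top + low) 2) >
        pengaGoal h C E M (PySem.Int.floordiv (top + low) 2 + 1) := hgt
    rw [pengaLoopA, pengaLoopB]
    simp only [dif_pos hlt, if_pos hgt2, if_pos hgt']
    exact ih
  | case2 low top hlt mid hngt ih =>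
    have hngt' : ¬ (pvCost s prefixL n total C E M (PySem.Int.floordiv (top + low) 2) >
        pvCost s prefixL n total C E M (PySem.Int.floordiv (top + low) 2 + 1)) := by
      rw [← hc, ← hc]; exact hngt
    have hngt2 : ¬ (pengaGoal h C E M (PySem.Int.floordiv (top + low) 2) >
        pengaGoal h C E M (PySem.Int.floordiv (top + low) 2 + 1)) := hngt
    rw [pengaLoopA, pengaLoopB]
    simp only [dif_pos hlt, if_neg hngt2, if_neg hngt']
    exact ih
  | case3 low top hnlt =>
    rw [pengaLoopA, pengaLoopB]
    simp only [dif_neg hnlt]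

lemma head_sorted_min (h : List Int) (hne : h ≠ []) :
    PySem.List.min? h (fun x => x) =
      some ((PySem.List.sorted h (fun x => x) false).getD 0 0) := by
  have hsne : PySem.List.sorted h (fun x => x) false ≠ [] := by
    simp [PySem.List.sorted_eq_nil_iff, hne]
  obtain ⟨s0, t, hst⟩ := List.exists_cons_of_ne_nil hsne
  have hmin : ∃ m, PySem.List.min? h (fun x => x) = some m := by
    cases hm : PySem.List.min? h (fun x => x) with
    | none => exact absurd ((PySem.List.min?_eq_none_iff h _).mp hm) hne
    | some m => exact ⟨m, rfl⟩
  obtain ⟨m, hm⟩ := hmin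
  have hmmem : m ∈ h := PySem.List.min?_mem hm
  have hmle : ∀ y ∈ h, m ≤ y := fun y hy => PySem.List.min?_isMin hm y hy
  have hs0le : ∀ y ∈ h, s0 ≤ y := PySem.List.key_head_sorted_le h (fun x => x) hst
  have hs0mem : s0 ∈ h := by
    rw [← PySem.List.mem_sorted h (fun x => x) false, hst]; simp
  rw [hm, hst]
  simp
  exact le_antisymm (hmle s0 hs0mem) (hs0le m hmmem)

lemma last_sorted_max (h : List Int) (hne : h ≠ []) :
    PySem.List.max? h (fun x => x) =
      some ((PySem.List.sorted h (fun x => x) false).getD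
        ((PySem.List.sorted h (fun x => x) false).length - 1) 0) := by
  set s := PySem.List.sorted h (fun x => x) false with hsdef
  have hsp : s.Pairwise (· ≤ ·) := PySem.List.sorted_pairwise h (fun x => x)
  have hlen : 0 < s.length := by
    rw [List.length_pos_iff]
    simp [hsdef, PySem.List.sorted_eq_nil_iff, hne]
  have hgetD : s.getD (s.length - 1) 0 = s[s.length - 1]'(by omega) :=
    List.getD_eq_getElem s 0 (by omega)
  have hlastmax : ∀ y ∈ h, y ≤ s[s.length - 1]'(by omega) := by
    intro y hy
    rw [← PySem.List.mem_sorted h (fun x => x) false, ← hsdef] at hy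
    obtain ⟨j, hj, hyj⟩ := List.mem_iff_getElem.mp hy
    subst hyj
    rcases Nat.lt_or_ge j (s.length - 1) with hc | hc
    · exact List.pairwise_iff_getElem.mp hsp j (s.length - 1) hj (by omega) hc
    · have : j = s.length - 1 := by omega
      subst this; rfl
  have hlastmem : s[s.length - 1]'(by omega) ∈ h := by
    rw [← PySem.List.mem_sorted h (fun x => x) false, ← hsdef]
    exact List.getElem_mem _
  have hmax : ∃ m, PySem.List.max? h (fun x => x) = some m := by
    cases hm : PySem.List.max? h (fun x => x) with
    | none => exact absurd ((PySem.List.max?_eq_none_iff h _).mp hm) hne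
    | some m => exact ⟨m, rfl⟩
  obtain ⟨m, hm⟩ := hmax
  have hmmem : m ∈ h := PySem.List.max?_mem hm
  have hmge : ∀ y ∈ h, y ≤ m := fun y hy => PySem.List.max?_isMax hm y hy
  rw [hm, hgetD]
  exact congrArg some (le_antisymm (hlastmax m hmmem) (hmge _ hlastmem))

-- ===== VERDICT (by name: the statement is the Claim_ definition above) =====
theorem penga_binary_spec : Claim_equal_penga_binary := by
  intro h_ C E M _hdom hpre
  have hpre' : h_ ≠ [] := hpre
  unfold Spec_penga_binary
  have hc : ∀ g, pengaGoal h_ C E M g =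
      pvCost (PySem.List.sorted h_ (fun x => x) false)
             (pvPrefix (PySem.List.sorted h_ (fun x => x) false)).1
             (PySem.List.sorted h_ (fun x => x) false).length
             (pvPrefix (PySem.List.sorted h_ (fun x => x) false)).2 C E M g :=
    fun g => cost_eq h_ C E M g hpre'
  have hloop := loop_eq h_ (PySem.List.sorted h_ (fun x => x) false)
      (pvPrefix (PySem.List.sorted h_ (fun x => x) false)).1
      (PySem.List.sorted h_ (fun x => x) false).length
      (pvPrefix (PySem.List.sorted h_ (fun x => x) false)).2 C E M hc
  unfold penga_binary penga_binary_alt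
  rw [head_sorted_min h_ hpre', last_sorted_max h_ hpre']
  simp only [hloop, hc]
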